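-- pv_equiv track=rewrite | github.com/fsufitch/dailyprogrammer | 248_intermediate/solution.py | weak_edge_tracking
-- ===== SOURCE A (Python) =====
-- def get_pixel(img, row, col, default=None):
--     if not (0 <= row < len(img)): # invalid row
--         return default
--     if not (0 <= col < len(img[row])): # invalid col
--         return default
--     return img[row][col]
--
-- def get_pixel_neighbors(img, row, col, distance, default=None):
--     subimg = []
--     for drow in range(-1*distance, distance+1):
--         subrow = []
--         for dcol in range(-1*distance, distance+1):
--             subrow.append(get_pixel(img, row + drow, col + dcol, default))
--         subimg.append(subrow)
--     return subimg
--
-- def weak_edge_tracking(threshold_img):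
--     edge_img = []
--     for i, row in enumerate(threshold_img):
--         edge_row = []
--         for j, value in enumerate(row):
--             neighbors = get_pixel_neighbors(threshold_img, i, j, 1, 0)
--             edge_value = 1
--             for nbr_row in neighbors:
--                 if 2 in nbr_row:
--                     break
--             else:
--                 edge_value = 0
--             edge_row.append(edge_value)
--         edge_img.append(edge_row)
--     return edge_img
-- ===== SOURCE B (Python) =====
-- def weak_edge_tracking(threshold_img):
--     # Scatter: start from an all-zero grid of the same (possibly ragged) shape,
--     # find the 2-pixels once, and stamp each one's 3x3 neighborhood to 1.
--     edge_img = [[0] * len(row) for row in threshold_img]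
--     twos = [(r, c)
--             for r, row in enumerate(threshold_img)
--             for c, v in enumerate(row) if v == 2]
--     for r, c in twos:
--         for dr in (-1, 0, 1):
--             for dc in (-1, 0, 1):
--                 rr, cc = r + dr, c + dc
--                 if 0 <= rr < len(threshold_img) and 0 <= cc < len(threshold_img[rr]):
--                     edge_img[rr][cc] = 1
--     return edge_img
-- ===== Notes on version B (the rewrite author's own statement) =====
-- stated objective: faster
-- what changed: Instead of gathering a 3x3 neighborhood list for every pixel and scanning it for a 2, B builds a zero grid, collects the coordinates of the 2-pixels in one pass, and scatters 1s into the 3x3 box around each of them (skipping out-of-bounds cells per ragged row).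
import Mathlib
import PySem

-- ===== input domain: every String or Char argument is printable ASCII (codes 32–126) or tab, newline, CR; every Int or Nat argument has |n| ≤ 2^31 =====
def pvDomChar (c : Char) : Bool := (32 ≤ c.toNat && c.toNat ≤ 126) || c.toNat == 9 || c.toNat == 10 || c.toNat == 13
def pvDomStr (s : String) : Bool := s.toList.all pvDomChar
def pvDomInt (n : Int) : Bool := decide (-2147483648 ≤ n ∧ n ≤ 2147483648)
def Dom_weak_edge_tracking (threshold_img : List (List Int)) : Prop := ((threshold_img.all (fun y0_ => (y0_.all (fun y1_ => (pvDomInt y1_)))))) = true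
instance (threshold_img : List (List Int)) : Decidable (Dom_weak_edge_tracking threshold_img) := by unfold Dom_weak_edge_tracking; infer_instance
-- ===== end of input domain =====

-- B replaces A's per-pixel 3x3 gather-and-scan with a single pass collecting the
-- 2-pixels and a scatter of 1s into each one's 3x3 box on a zero grid (faster when
-- 2-pixels are sparse; return value identical, no argument is mutated by either).

-- ===== PORT A =====
def get_pixel (img : List (List Int)) (row col : Int) (default : Int) : Int :=
  if ¬ (0 ≤ row ∧ row < (img.length : Int)) then default
  else if ¬ (0 ≤ col ∧ col < ((PySem.List.pyGetD img row []).length : Int)) then default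
  else PySem.List.pyGetD (PySem.List.pyGetD img row []) col default

def get_pixel_neighbors (img : List (List Int)) (row col distance : Int) (default : Int) :
    List (List Int) :=
  (PySem.List.pyRange (-1 * distance) (distance + 1) 1).map (fun drow =>
    (PySem.List.pyRange (-1 * distance) (distance + 1) 1).map (fun dcol =>
      get_pixel img (row + drow) (col + dcol) default))

def weak_edge_tracking (threshold_img : List (List Int)) : List (List Int) :=
  (PySem.List.enumerate threshold_img 0).map (fun p =>
    (PySem.List.enumerate p.2 0).map (fun q =>
      let neighbors := get_pixel_neighbors threshold_img p.1 q.1 1 0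
      -- for/else with break: edge_value is 1 iff some neighbor row contains a 2
      if neighbors.any (fun nr => nr.contains 2) then (1 : Int) else 0))

-- ===== PORT B =====
def pvZeroGrid (img : List (List Int)) : List (List Int) :=
  img.map (fun row => row.map (fun _ => (0 : Int)))

def pvTwos (img : List (List Int)) : List (Int × Int) :=
  (PySem.List.enumerate img 0).flatMap (fun p =>
    ((PySem.List.enumerate p.2 0).filter (fun q => q.2 == 2)).map (fun q => (p.1, q.1)))

def pvDeltas : List (Int × Int) :=
  [(-1, -1), (-1, 0), (-1, 1), (0, -1), (0, 0), (0, 1), (1, -1), (1, 0), (1, 1)]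

def pvStamp (img g : List (List Int)) (r c : Int) : List (List Int) :=
  pvDeltas.foldl (fun g d =>
    let rr := r + d.1
    let cc := c + d.2
    if 0 ≤ rr ∧ rr < (img.length : Int) ∧ 0 ≤ cc ∧ cc < ((PySem.List.pyGetD img rr []).length : Int)
    then PySem.List.pySetD g rr (PySem.List.pySetD (PySem.List.pyGetD g rr []) cc 1)
    else g) g

def weak_edge_tracking_alt (threshold_img : List (List Int)) : List (List Int) :=
  (pvTwos threshold_img).foldl (fun g rc => pvStamp threshold_img g rc.1 rc.2)
    (pvZeroGrid threshold_img)

-- ===== PRECONDITION & SPEC =====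
def Spec_weak_edge_tracking (threshold_img : List (List Int)) (out : List (List Int)) : Prop := out = weak_edge_tracking_alt threshold_img
instance (threshold_img : List (List Int)) (out : List (List Int)) : Decidable (Spec_weak_edge_tracking threshold_img out) := by unfold Spec_weak_edge_tracking; infer_instance

-- ===== CLAIM (what is proved, stated in full; the proofs are below) =====
def Claim_equal_weak_edge_tracking : Prop := ∀ (threshold_img : List (List Int)), Dom_weak_edge_tracking threshold_img → Spec_weak_edge_tracking threshold_img (weak_edge_tracking threshold_img)

-- ===== LEMMAS AND PROOFS =====

-- "(i,j) is within the 3x3 box centred at (r,c)"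
def pvHit (r c : Int) (i j : Nat) : Bool :=
  r - 1 ≤ (i : Int) && (i : Int) ≤ r + 1 && c - 1 ≤ (j : Int) && (j : Int) ≤ c + 1

-- "some 2-pixel of img lies within the 3x3 box centred at (i,j)"
def pvNear (img : List (List Int)) (i j : Nat) : Bool :=
  (pvTwos img).any (fun rc => pvHit rc.1 rc.2 i j)

-- nested optional lookup
def pvGetC (g : List (List Int)) (i j : Nat) : Option Int :=
  g[i]?.bind (fun row => row[j]?)

def pvShape (g : List (List Int)) : List Nat := g.map List.length

theorem pvMem_twos (img : List (List Int)) (p : Int × Int) :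
    p ∈ pvTwos img ↔ ∃ (r c : Nat), p = ((r : Int), (c : Int)) ∧
      ∃ (hr : r < img.length) (hc : c < img[r].length), img[r][c] = 2 := by
  simp only [pvTwos, List.mem_flatMap, List.mem_map, List.mem_filter,
    PySem.List.mem_enumerate_iff, beq_iff_eq]
  constructor
  · rintro ⟨a, ⟨r, hr, rfl⟩, q, ⟨⟨c, hc, rfl⟩, h2⟩, rfl⟩
    exact ⟨r, c, by simp, hr, hc, h2⟩
  · rintro ⟨r, c, rfl, hr, hc, h2⟩
    exact ⟨((r:Int), img[r]), ⟨r, hr, by simp⟩, ((c:Int), img[r][c]), ⟨⟨c, hc, by simp⟩, h2⟩,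
      by simp⟩

theorem pvGp2 (img : List (List Int)) (a b : Int) :
    get_pixel img a b 0 = 2 ↔ ∃ (r c : Nat), ((a = (r:Int) ∧ b = (c:Int)) ∧
      ∃ (hr : r < img.length) (hc : c < img[r].length), img[r][c] = 2) := by
  unfold get_pixel
  split_ifs with h1 h2
  · rw [PySem.List.pyGetD_eq_getElem img [] h1.1 h1.2] at h2 ⊢
    rw [PySem.List.pyGetD_eq_getElem _ 0 h2.1 h2.2]
    constructor
    · intro hv
      refine ⟨a.toNat, b.toNat, ⟨(Int.toNat_of_nonneg h1.1).symm, (Int.toNat_of_nonneg h2.1).symm⟩,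
        ?_, ?_, hv⟩ <;> omega
    · rintro ⟨r, c, ⟨rfl, rfl⟩, hr, hc, hv⟩
      simpa using hv
  · rw [PySem.List.pyGetD_eq_getElem img [] h1.1 h1.2] at h2
    constructor
    · omega
    · rintro ⟨r, c, ⟨rfl, rfl⟩, hr, hc, -⟩
      exact absurd ⟨by positivity, by simpa using hc⟩ h2
  · constructor
    · omega
    · rintro ⟨r, c, ⟨rfl, rfl⟩, hr, hc, -⟩
      exact absurd ⟨by positivity, by exact_mod_cast hr⟩ h1

theorem pvAval_eq (img : List (List Int)) (i j : Nat) :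
    ((get_pixel_neighbors img i j 1 0).any (fun nr => nr.contains 2)) = pvNear img i j := by
  apply Bool.coe_iff_coe.mp
  rw [get_pixel_neighbors, show PySem.List.pyRange (-1*1) (1+1) 1 = [-1,0,1] from by decide]
  simp only [List.any_eq_true, List.mem_map, List.contains_eq_mem, List.mem_cons,
    List.not_mem_nil, or_false, decide_eq_true_eq, pvNear]
  constructor
  · rintro ⟨nr, ⟨dr, hdr, rfl⟩, hmem⟩
    rw [List.mem_map] at hmem
    obtain ⟨dc, hdc, hv⟩ := hmem
    obtain ⟨r, c, ⟨har, hac⟩, hr, hc, h2⟩ := (pvGp2 img _ _).mp hv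
    refine ⟨((r:Int), (c:Int)), (pvMem_twos img _).mpr ⟨r, c, rfl, hr, hc, h2⟩, ?_⟩
    simp only [pvHit, Bool.and_eq_true, decide_eq_true_eq]
    rw [List.mem_cons, List.mem_cons, List.mem_singleton] at hdc
    have hdr' : -1 ≤ dr ∧ dr ≤ 1 := by rcases hdr with rfl | rfl | rfl <;> omega
    have hdc' : -1 ≤ dc ∧ dc ≤ 1 := by rcases hdc with rfl | rfl | rfl <;> omega
    refine ⟨⟨⟨?_, ?_⟩, ?_⟩, ?_⟩ <;> omega
  · rintro ⟨rc, hmem, hhit⟩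
    obtain ⟨r, c, rfl, hr, hc, h2⟩ := (pvMem_twos img _).mp hmem
    simp only [pvHit, Bool.and_eq_true, decide_eq_true_eq] at hhit
    refine ⟨_, ⟨(r:Int) - i, by omega, rfl⟩, ?_⟩
    rw [List.mem_map]
    refine ⟨(c:Int) - j, by simp only [List.mem_cons]; omega, ?_⟩
    exact ((pvGp2 img _ _).mpr ⟨r, c, ⟨by omega, by omega⟩, hr, hc, h2⟩)

-- the loop body of pvStamp, named so the fold can be reasoned about step by step
def pvStep (img : List (List Int)) (r c : Int) (g : List (List Int)) (d : Int × Int) :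
    List (List Int) :=
  if 0 ≤ r + d.1 ∧ r + d.1 < (img.length : Int) ∧ 0 ≤ c + d.2 ∧
      c + d.2 < ((PySem.List.pyGetD img (r + d.1) []).length : Int)
  then PySem.List.pySetD g (r + d.1)
    (PySem.List.pySetD (PySem.List.pyGetD g (r + d.1) []) (c + d.2) 1)
  else g

theorem pvStamp_eq (img g : List (List Int)) (r c : Int) :
    pvStamp img g r c = pvDeltas.foldl (pvStep img r c) g := rfl

theorem pvShape_length (g img : List (List Int)) (h : pvShape g = pvShape img) :
    g.length = img.length := by
  have := congrArg List.length h
  simpa [pvShape] using this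

theorem pvShape_row (g img : List (List Int)) (h : pvShape g = pvShape img) (k : Nat) :
    g[k]?.map List.length = img[k]?.map List.length := by
  have := congrArg (fun l => l[k]?) h
  simpa [pvShape, List.getElem?_map] using this

theorem pvShape_step (img g : List (List Int)) (r c : Int) (d : Int × Int)
    (h : pvShape g = pvShape img) : pvShape (pvStep img r c g d) = pvShape img := by
  unfold pvStep
  split_ifs with hcond
  · obtain ⟨h0, h1, h2, h3⟩ := hcond
    rw [PySem.List.pySetD_of_nonneg _ _ h0]
    have hlt : (r + d.1).toNat < g.length := by
      rw [pvShape_length g img h]; omega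
    rw [← h, pvShape, List.map_set, pvShape]
    rw [PySem.List.pySetD_of_nonneg _ _ h2, List.length_set]
    have : (PySem.List.pyGetD g (r + d.1) []).length = g[(r + d.1).toNat].length := by
      rw [PySem.List.pyGetD_eq_getElem g [] h0 (by rw [pvShape_length g img h]; exact_mod_cast h1)]
    rw [this, ← List.getElem_map (f := List.length) (h := by simpa using hlt)]
    exact List.set_getElem_self (by simpa using hlt)
  · exact h

theorem pvStep_getC (img g : List (List Int)) (r c : Int) (d : Int × Int) (i j : Nat)
    (h : pvShape g = pvShape img) :
    pvGetC (pvStep img r c g d) i j =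
      if (r + d.1 = (i : Int) ∧ c + d.2 = (j : Int)) ∧ i < img.length ∧ j < (img[i]?.getD []).length
      then some 1 else pvGetC g i j := by
  have hlen := pvShape_length g img h
  have hrow := pvShape_row g img h i
  by_cases hm : (r + d.1 = (i : Int) ∧ c + d.2 = (j : Int)) ∧ i < img.length ∧
      j < (img[i]?.getD []).length
  · rw [if_pos hm]
    obtain ⟨⟨hri, hcj⟩, hil, hjl⟩ := hm
    rw [List.getElem?_eq_getElem hil] at hjl
    simp only [Option.getD_some] at hjl
    have higl : (PySem.List.pyGetD img (r + d.1) []).length = img[i].length := by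
      rw [PySem.List.pyGetD_eq_getElem img [] (by omega) (by exact_mod_cast (by omega : r + d.1 < (img.length : Int)))]
      congr 2
      omega
    have hcond : 0 ≤ r + d.1 ∧ r + d.1 < (img.length : Int) ∧ 0 ≤ c + d.2 ∧
        c + d.2 < ((PySem.List.pyGetD img (r + d.1) []).length : Int) := by
      refine ⟨by omega, by exact_mod_cast (by omega : r + d.1 < (img.length : Int)), by omega, ?_⟩
      rw [higl]; omega
    rw [pvStep, if_pos hcond]
    obtain ⟨h0, h1, h2, h3⟩ := hcond
    rw [PySem.List.pySetD_of_nonneg _ _ h0, PySem.List.pySetD_of_nonneg _ _ h2]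
    have hig : i < g.length := by omega
    have hrr : (r + d.1).toNat = i := by omega
    have hcc : (c + d.2).toNat = j := by omega
    have hgi : PySem.List.pyGetD g (r + d.1) [] = g[i] := by
      rw [PySem.List.pyGetD_eq_getElem g [] h0 (by exact_mod_cast (by omega : r + d.1 < (g.length : Int)))]
      congr 1
    have hjg : j < g[i].length := by
      rw [List.getElem?_eq_getElem hig, List.getElem?_eq_getElem hil] at hrow
      simp only [Option.map_some, Option.some.injEq] at hrow
      omega
    simp [pvGetC, hrr, hgi, hcc, hig, hjg]
  · rw [if_neg hm, pvStep]
    split_ifs with hcond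
    · obtain ⟨h0, h1, h2, h3⟩ := hcond
      rw [PySem.List.pySetD_of_nonneg _ _ h0, PySem.List.pySetD_of_nonneg _ _ h2]
      simp only [pvGetC, List.getElem?_set]
      by_cases hri : (r + d.1).toNat = i
      · rw [if_pos hri, if_pos (by omega : (r + d.1).toNat < g.length)]
        have hgi : PySem.List.pyGetD g (r + d.1) [] = g[i] := by
          rw [PySem.List.pyGetD_eq_getElem g [] h0 (by exact_mod_cast (by omega : r + d.1 < (g.length : Int)))]
          congr 1
        have higl : (PySem.List.pyGetD img (r + d.1) []).length = (img[i]?.getD []).length := by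
          rw [PySem.List.pyGetD_eq_getElem img [] h0 (by exact_mod_cast h1)]
          rw [List.getElem?_eq_getElem (by omega : i < img.length)]
          simp only [Option.getD_some]
          congr 2
        have hcc : (c + d.2).toNat ≠ j := by
          intro hj
          exact hm ⟨⟨by omega, by omega⟩, by omega, by rw [← higl]; omega⟩
        rw [hgi, List.getElem?_eq_getElem (by omega : i < g.length), Option.bind_some,
          Option.bind_some, List.getElem?_set, if_neg hcc]
      · rw [if_neg hri]
    · rfl

theorem pvFold_shape (img : List (List Int)) (r c : Int) (ds : List (Int × Int))
    (g : List (List Int)) (h : pvShape g = pvShape img) :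
    pvShape (ds.foldl (pvStep img r c) g) = pvShape img := by
  induction ds generalizing g with
  | nil => exact h
  | cons d ds ih => exact ih _ (pvShape_step img g r c d h)

theorem pvShape_stamp (img g : List (List Int)) (r c : Int) (h : pvShape g = pvShape img) :
    pvShape (pvStamp img g r c) = pvShape img := by
  rw [pvStamp_eq]
  exact pvFold_shape img r c pvDeltas g h

theorem pvIf_merge {α : Type} (P Q S : Prop) [Decidable P] [Decidable Q] [Decidable S]
    (x y : α) :
    (if P ∧ S then x else if Q ∧ S then x else y) = if (Q ∨ P) ∧ S then x else y := by
  split_ifs <;> tauto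

theorem pvIf_merge2 {α : Type} (N S : Prop) [Decidable N] [Decidable S] (x y z : α) :
    (if N ∧ S then x else if S then y else z) = if S then (if N then x else y) else z := by
  split_ifs <;> tauto

theorem pvFold_step (img : List (List Int)) (r c : Int) (ds : List (Int × Int))
    (g : List (List Int)) (i j : Nat) (h : pvShape g = pvShape img) :
    pvGetC (ds.foldl (pvStep img r c) g) i j =
      if (∃ d ∈ ds, r + d.1 = (i : Int) ∧ c + d.2 = (j : Int)) ∧ i < img.length ∧
          j < (img[i]?.getD []).length
      then some 1 else pvGetC g i j := by
  induction ds generalizing g with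
  | nil => simp
  | cons d ds ih =>
    rw [List.foldl_cons, ih _ (pvShape_step img g r c d h), pvStep_getC img g r c d i j h,
      pvIf_merge]
    simp only [List.exists_mem_cons_iff]

theorem pvGetC_stamp (img g : List (List Int)) (r c : Int) (i j : Nat)
    (h : pvShape g = pvShape img) :
    pvGetC (pvStamp img g r c) i j =
      if pvHit r c i j ∧ i < img.length ∧ j < (img[i]?.getD []).length
      then some 1 else pvGetC g i j := by
  rw [pvStamp_eq, pvFold_step img r c pvDeltas g i j h]
  have hiff : (∃ d ∈ pvDeltas, r + d.1 = (i : Int) ∧ c + d.2 = (j : Int)) ↔ pvHit r c i j = true := by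
    simp only [pvDeltas, pvHit, List.mem_cons, List.not_mem_nil, or_false, Bool.and_eq_true,
      decide_eq_true_eq]
    constructor
    · rintro ⟨d, hd, h1, h2⟩
      rcases hd with rfl | rfl | rfl | rfl | rfl | rfl | rfl | rfl | rfl <;>
        simp at h1 h2 <;> omega
    · rintro ⟨⟨⟨ha, hb⟩, hc'⟩, hd'⟩
      refine ⟨((i : Int) - r, (j : Int) - c), ?_, by omega, by omega⟩
      have h1 : (i : Int) - r = -1 ∨ (i : Int) - r = 0 ∨ (i : Int) - r = 1 := by omega
      have h2 : (j : Int) - c = -1 ∨ (j : Int) - c = 0 ∨ (j : Int) - c = 1 := by omega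
      rcases h1 with h1 | h1 | h1 <;> rcases h2 with h2 | h2 | h2 <;> rw [h1, h2] <;> tauto
  simp only [hiff]

theorem pvGetC_fold (img : List (List Int)) (L : List (Int × Int)) (g : List (List Int))
    (i j : Nat) (h : pvShape g = pvShape img) :
    pvGetC (L.foldl (fun g rc => pvStamp img g rc.1 rc.2) g) i j =
      if (L.any (fun rc => pvHit rc.1 rc.2 i j)) ∧ i < img.length ∧ j < (img[i]?.getD []).length
      then some 1 else pvGetC g i j := by
  induction L generalizing g with
  | nil => simp
  | cons p L ih =>
    rw [List.foldl_cons, ih _ (pvShape_stamp img g p.1 p.2 h), pvGetC_stamp img g p.1 p.2 i j h,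
      pvIf_merge]
    simp only [List.any_cons, Bool.or_eq_true]

theorem pvGetC_alt (img : List (List Int)) (i j : Nat) :
    pvGetC (weak_edge_tracking_alt img) i j =
      if i < img.length ∧ j < (img[i]?.getD []).length
      then some (if pvNear img i j then 1 else 0) else none := by
  have hz : pvShape (pvZeroGrid img) = pvShape img := by
    simp [pvShape, pvZeroGrid, List.map_map]
  have hz2 : pvGetC (pvZeroGrid img) i j =
      if i < img.length ∧ j < (img[i]?.getD []).length then some 0 else none := by
    simp only [pvGetC, pvZeroGrid, List.getElem?_map]
    cases himg : img[i]? with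
    | none =>
      have hni : ¬ i < img.length := by
        intro hlt
        simp [List.getElem?_eq_getElem hlt] at himg
      simp [hni]
    | some row =>
      have hi : i < img.length := by
        by_contra hlt
        rw [List.getElem?_eq_none_iff.mpr (by omega)] at himg
        simp at himg
      simp only [Option.map_some, Option.bind_some, List.getElem?_map, Option.getD_some, hi,
        true_and]
      cases hrj : row[j]? with
      | none =>
        have : ¬ j < row.length := fun hlt => by simp [List.getElem?_eq_getElem hlt] at hrj
        simp [this]
      | some v =>
        have : j < row.length := by
          by_contra hlt
          rw [List.getElem?_eq_none_iff.mpr (by omega)] at hrj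
          simp at hrj
        simp [this]
  rw [weak_edge_tracking_alt, pvGetC_fold img (pvTwos img) (pvZeroGrid img) i j hz, hz2,
    pvIf_merge2]
  rw [show ((pvTwos img).any fun rc => pvHit rc.1 rc.2 i j) = pvNear img i j from rfl]
  split_ifs <;> rfl

theorem pvShape_foldStamp (img : List (List Int)) (L : List (Int × Int))
    (g : List (List Int)) (h : pvShape g = pvShape img) :
    pvShape (L.foldl (fun g rc => pvStamp img g rc.1 rc.2) g) = pvShape img := by
  induction L generalizing g with
  | nil => exact h
  | cons p L ih => exact ih _ (pvShape_stamp img g p.1 p.2 h)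

theorem pvShape_alt (img : List (List Int)) :
    pvShape (weak_edge_tracking_alt img) = pvShape img := by
  rw [weak_edge_tracking_alt]
  exact pvShape_foldStamp img (pvTwos img) (pvZeroGrid img)
    (by simp [pvShape, pvZeroGrid, List.map_map])

theorem pvGetC_A (img : List (List Int)) (i j : Nat) :
    pvGetC (weak_edge_tracking img) i j =
      if i < img.length ∧ j < (img[i]?.getD []).length
      then some (if pvNear img i j then 1 else 0) else none := by
  simp only [pvGetC, weak_edge_tracking, List.getElem?_map, PySem.List.getElem?_enumerate]
  cases himg : img[i]? with
  | none =>
    have hni : ¬ i < img.length := by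
      intro hlt
      simp [List.getElem?_eq_getElem hlt] at himg
    simp [hni]
  | some row =>
    have hi : i < img.length := by
      by_contra hlt
      rw [List.getElem?_eq_none_iff.mpr (by omega)] at himg
      simp at himg
    simp only [Option.map_some, Option.bind_some, List.getElem?_map,
      PySem.List.getElem?_enumerate, Option.getD_some, hi, true_and]
    cases hrj : row[j]? with
    | none =>
      have hnj : ¬ j < row.length := by
        intro hlt
        simp [List.getElem?_eq_getElem hlt] at hrj
      simp [hnj]
    | some v =>
      have hj : j < row.length := by
        by_contra hlt
        rw [List.getElem?_eq_none_iff.mpr (by omega)] at hrj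
        simp at hrj
      simp only [Option.map_some, hj, if_pos trivial]
      rw [show ((0 : Int) + (i : Int)) = (i : Int) by omega,
        show ((0 : Int) + (j : Int)) = (j : Int) by omega, pvAval_eq]

-- ===== VERDICT (by name: the statement is the Claim_ definition above) =====
theorem weak_edge_tracking_spec : Claim_equal_weak_edge_tracking := by
  intro img _
  show weak_edge_tracking img = weak_edge_tracking_alt img
  have hlA : (weak_edge_tracking img).length = img.length := by
    simp [weak_edge_tracking, PySem.List.length_enumerate]
  have hlB : (weak_edge_tracking_alt img).length = img.length :=
    pvShape_length _ _ (pvShape_alt img)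
  apply List.ext_getElem?
  intro i
  by_cases hi : i < img.length
  · rw [List.getElem?_eq_getElem (by omega : i < (weak_edge_tracking img).length),
      List.getElem?_eq_getElem (by omega : i < (weak_edge_tracking_alt img).length)]
    congr 1
    apply List.ext_getElem?
    intro j
    have h1 := pvGetC_A img i j
    have h2 := pvGetC_alt img i j
    rw [pvGetC, List.getElem?_eq_getElem (by omega : i < (weak_edge_tracking img).length)] at h1
    rw [pvGetC, List.getElem?_eq_getElem (by omega : i < (weak_edge_tracking_alt img).length)] at h2
    simp only [Option.bind_some] at h1 h2
    rw [h1, h2]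
  · rw [List.getElem?_eq_none_iff.mpr (by omega), List.getElem?_eq_none_iff.mpr (by omega)]
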